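-- pv_equiv track=rewrite | github.com/MCG-NJU/BFRNet | visual.py | compute_receptive_size
-- ===== SOURCE A (Python) =====
-- def compute_receptive_size(ks, ds, ss):
--     # ks: list of kernel size;  ds: list of dilation size;  ss: list of stride size
--     layers = len(ks)
--     rs = [1]  # list of receptive size
--     s = 1
--     ss.insert(0, 1)
--     for i in range(layers):
--         s = s * ss[i]
--         rs.append(rs[i] + ds[i] * (ks[i] - 1) * s)
--     return rs
-- ===== SOURCE B (Python) =====
-- def compute_receptive_size(ks, ds, ss):
--     # direct per-index computation from the definition (no running accumulator);
--     # reproduces A's in-place mutation of ss (insert of 1 at the front)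
--     ss.insert(0, 1)
--
--     def stride_prod(j):
--         p = 1
--         for v in ss[:j + 1]:
--             p *= v
--         return p
--
--     terms = [ds[j] * (ks[j] - 1) * stride_prod(j) for j in range(len(ks))]
--     return [1 + sum(terms[:i]) for i in range(len(ks) + 1)]
-- ===== Notes on version B (the rewrite author's own statement) =====
-- stated objective: alternative
-- what changed: Replaces A's single fused loop with running accumulators by a brute-force direct computation from the definition: each term recomputes its stride product from a list slice and each output entry recomputes its prefix sum, with no running state carried between outputs.
import Mathlib
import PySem

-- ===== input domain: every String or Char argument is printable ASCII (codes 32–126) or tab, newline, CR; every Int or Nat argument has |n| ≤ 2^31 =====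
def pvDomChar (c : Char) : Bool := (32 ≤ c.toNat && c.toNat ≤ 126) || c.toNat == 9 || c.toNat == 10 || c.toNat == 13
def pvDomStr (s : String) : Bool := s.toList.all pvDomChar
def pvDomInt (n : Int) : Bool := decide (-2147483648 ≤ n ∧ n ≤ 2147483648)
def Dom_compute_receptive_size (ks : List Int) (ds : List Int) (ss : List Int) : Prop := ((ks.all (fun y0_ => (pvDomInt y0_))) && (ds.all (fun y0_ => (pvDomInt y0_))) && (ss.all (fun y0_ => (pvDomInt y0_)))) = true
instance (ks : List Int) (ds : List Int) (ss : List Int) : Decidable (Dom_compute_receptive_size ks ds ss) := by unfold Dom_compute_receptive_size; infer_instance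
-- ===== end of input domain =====

-- B recomputes each term's stride product from a slice and each output entry's prefix sum directly
-- (no running accumulators); equivalence is about the RETURN value — both Pythons also mutate ss in
-- place the same way (insert 1 at front).

-- ===== PORT A =====
-- indexing is exact under Pre_ (all indices in range), so pyGetD with default 0 never uses its default
def compute_receptive_size (ks : List Int) (ds : List Int) (ss : List Int) : List Int :=
  let layers : Int := (ks.length : Int)
  let ss1 := PySem.List.insert ss 0 1
  let st := (PySem.List.pyRange 0 layers 1).foldl
    (fun (st : List Int × Int) (i : Int) =>
      let s := st.2 * PySem.List.pyGetD ss1 i 0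
      (st.1 ++ [PySem.List.pyGetD st.1 i 0 +
                PySem.List.pyGetD ds i 0 * (PySem.List.pyGetD ks i 0 - 1) * s], s))
    ([1], 1)
  st.1

-- ===== PORT B =====
def compute_receptive_size_alt (ks : List Int) (ds : List Int) (ss : List Int) : List Int :=
  let ss1 := PySem.List.insert ss 0 1
  let strideProd : Int → Int := fun j =>
    (PySem.List.slice ss1 none (some (j + 1))).foldl (fun p v => p * v) 1
  let terms := (PySem.List.pyRange 0 (ks.length : Int) 1).map
      (fun j => PySem.List.pyGetD ds j 0 * (PySem.List.pyGetD ks j 0 - 1) * strideProd j)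
  (PySem.List.pyRange 0 ((ks.length : Int) + 1) 1).map
      (fun i => 1 + (PySem.List.slice terms none (some i)).foldl (fun a x => a + x) 0)

-- ===== PRECONDITION & SPEC =====
-- Pre_ excludes exactly the inputs where A raises IndexError: ds shorter than ks, or ss (after the
-- front insert) shorter than ks.
def Pre_compute_receptive_size (ks : List Int) (ds : List Int) (ss : List Int) : Prop :=
  ks.length ≤ ds.length ∧ ks.length ≤ ss.length + 1
instance (ks : List Int) (ds : List Int) (ss : List Int) : Decidable (Pre_compute_receptive_size ks ds ss) := by unfold Pre_compute_receptive_size; infer_instance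
def pvWitness_compute_receptive_size : List Int × List Int × List Int := ([3, 3], [1, 2], [2, 1])

def Spec_compute_receptive_size (ks : List Int) (ds : List Int) (ss : List Int) (out : List Int) : Prop := out = compute_receptive_size_alt ks ds ss
instance (ks : List Int) (ds : List Int) (ss : List Int) (out : List Int) : Decidable (Spec_compute_receptive_size ks ds ss out) := by unfold Spec_compute_receptive_size; infer_instance

-- ===== CLAIM (what is proved, stated in full; the proofs are below) =====
def Claim_equal_compute_receptive_size : Prop := ∀ (ks : List Int) (ds : List Int) (ss : List Int), Dom_compute_receptive_size ks ds ss → Pre_compute_receptive_size ks ds ss → Spec_compute_receptive_size ks ds ss (compute_receptive_size ks ds ss)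

-- ===== LEMMAS AND PROOFS =====

-- running sums of the per-layer increments (reference shape for A's loop)
def pvGo (l : List (Int × Int × Int)) (t : Int) : List Int :=
  match l with
  | [] => []
  | (k, d, c) :: rest => (t + d * (k - 1) * c) :: pvGo rest (t + d * (k - 1) * c)

-- running sums of a plain increment list (reference shape for B's prefix sums)
def pvGo2 (e : List Int) (t : Int) : List Int :=
  match e with
  | [] => []
  | x :: rest => (t + x) :: pvGo2 rest (t + x)

-- cumulative products starting from p
def pvCum (l : List Int) (p : Int) : List Int :=
  match l with
  | [] => []
  | v :: rest => (p * v) :: pvCum rest (p * v)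

lemma pvGetD_append_mid (pre : List Int) (y : Int) (ys : List Int) :
    PySem.List.pyGetD (pre ++ y :: ys) (pre.length : Int) 0 = y := by
  simp [PySem.List.pyGetD_natCast, List.getD]

-- invariant for A's fused loop, generalizing over the consumed prefix
lemma pvAloop (kr : List Int) : ∀ (dr cr : List Int) (kp dp cp acc0 : List Int) (t0 s : Int),
    dp.length = kp.length → cp.length = kp.length → acc0.length = kp.length →
    kr.length ≤ dr.length → kr.length ≤ cr.length →
    ((PySem.List.pyRange (kp.length : Int) ((kp.length : Int) + (kr.length : Int)) 1).foldl
      (fun (st : List Int × Int) (i : Int) =>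
        let s := st.2 * PySem.List.pyGetD (cp ++ cr) i 0
        (st.1 ++ [PySem.List.pyGetD st.1 i 0 +
                  PySem.List.pyGetD (dp ++ dr) i 0 * (PySem.List.pyGetD (kp ++ kr) i 0 - 1) * s], s))
      (acc0 ++ [t0], s)).1
    = acc0 ++ [t0] ++ pvGo (kr.zip (dr.zip (pvCum cr s))) t0 := by
  induction kr with
  | nil =>
    intro dr cr kp dp cp acc0 t0 s _ _ _ _ _
    rw [PySem.List.pyRange_one_eq_nil (by simp)]
    simp [pvGo]
  | cons k kr ih =>
    intro dr cr kp dp cp acc0 t0 s hdp hcp hacc hdr hcr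
    cases dr with
    | nil => simp at hdr
    | cons d dr =>
    cases cr with
    | nil => simp at hcr
    | cons c cr =>
      rw [PySem.List.pyRange_one_cons (by simp only [List.length_cons]; push_cast; omega)]
      simp only [List.foldl_cons]
      have hget_c : PySem.List.pyGetD (cp ++ c :: cr) (kp.length : Int) 0 = c := by
        rw [← hcp]; exact pvGetD_append_mid cp c cr
      have hget_d : PySem.List.pyGetD (dp ++ d :: dr) (kp.length : Int) 0 = d := by
        rw [← hdp]; exact pvGetD_append_mid dp d dr
      have hget_k : PySem.List.pyGetD (kp ++ k :: kr) (kp.length : Int) 0 = k := by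
        exact pvGetD_append_mid kp k kr
      have hget_t : PySem.List.pyGetD (acc0 ++ [t0]) (kp.length : Int) 0 = t0 := by
        rw [← hacc]; exact pvGetD_append_mid acc0 t0 []
      simp only [hget_c, hget_d, hget_k, hget_t]
      have hrange : PySem.List.pyRange ((kp.length : Int) + 1)
          ((kp.length : Int) + ((k :: kr).length : Int)) 1
          = PySem.List.pyRange (((kp ++ [k]).length : Int))
              (((kp ++ [k]).length : Int) + (kr.length : Int)) 1 := by
        congr 1 <;> simp only [List.length_append, List.length_cons, List.length_nil] <;> push_cast <;> ring
      have hlists : cp ++ c :: cr = (cp ++ [c]) ++ cr := by simp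
      have hlists2 : dp ++ d :: dr = (dp ++ [d]) ++ dr := by simp
      have hlists3 : kp ++ k :: kr = (kp ++ [k]) ++ kr := by simp
      rw [hrange, hlists, hlists2, hlists3]
      have := ih dr cr (kp ++ [k]) (dp ++ [d]) (cp ++ [c]) (acc0 ++ [t0])
          (t0 + d * (k - 1) * (s * c)) (s * c)
          (by simp [hdp]) (by simp [hcp]) (by simp [hacc])
          (by simpa using hdr) (by simpa using hcr)
      rw [this]
      simp [pvGo, pvCum, List.zip_cons_cons]

-- A's port reduced to the reference shape
lemma pvA_eq (ks ds ss : List Int) (h1 : ks.length ≤ ds.length) (h2 : ks.length ≤ ss.length + 1) :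
    compute_receptive_size ks ds ss
      = [(1 : Int)] ++ pvGo (ks.zip (ds.zip (pvCum (1 :: ss) 1))) 1 := by
  unfold compute_receptive_size
  simp only [PySem.List.insert_zero]
  have := pvAloop ks ds (1 :: ss) [] [] [] [] 1 1 rfl rfl rfl h1 (by simpa using h2)
  simpa using this

@[simp] lemma pvCum_length (l : List Int) : ∀ p, (pvCum l p).length = l.length := by
  induction l with
  | nil => intro p; simp [pvCum]
  | cons v r ih => intro p; simp [pvCum, ih]

@[simp] lemma pvGo2_length (e : List Int) : ∀ t, (pvGo2 e t).length = e.length := by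
  induction e with
  | nil => intro t; simp [pvGo2]
  | cons x r ih => intro t; simp [pvGo2, ih]

-- the slice product of B equals the corresponding cumulative product entry
lemma pvProdTake (l : List Int) : ∀ (p : Int) (j : Nat), j < l.length →
    (l.take (j + 1)).foldl (fun a v => a * v) p = (pvCum l p).getD j 0 := by
  induction l with
  | nil => intro p j h; simp at h
  | cons v r ih =>
    intro p j h
    cases j with
    | zero => simp [pvCum]
    | succ j =>
      simp only [List.take_succ_cons, List.foldl_cons, pvCum, List.getD_cons_succ]
      exact ih (p * v) j (by simpa using h)

-- each entry of the running-sum list is the prefix sum of the increments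
lemma pvGo2_getD (e : List Int) : ∀ (t : Int) (j : Nat), j < e.length →
    (pvGo2 e t).getD j 0 = t + (e.take (j + 1)).sum := by
  induction e with
  | nil => intro t j h; simp at h
  | cons x r ih =>
    intro t j h
    cases j with
    | zero => simp [pvGo2]
    | succ j =>
      simp only [pvGo2, List.getD_cons_succ, List.take_succ_cons, List.sum_cons]
      rw [ih (t + x) j (by simpa using h)]
      ring

-- A's triple-shaped running sums are the running sums of the mapped increments
lemma pvGo_eq_go2 (l : List (Int × Int × Int)) : ∀ t,
    pvGo l t = pvGo2 (l.map (fun x => x.2.1 * (x.1 - 1) * x.2.2)) t := by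
  induction l with
  | nil => intro t; simp [pvGo, pvGo2]
  | cons x r ih => intro t; obtain ⟨k, d, c⟩ := x; simp [pvGo, pvGo2, ih]

-- B's terms list equals the zip-shaped increments list
lemma pvTerms_eq (ks ds ss : List Int) (h1 : ks.length ≤ ds.length) (h2 : ks.length ≤ ss.length + 1) :
    (PySem.List.pyRange 0 (ks.length : Int) 1).map
      (fun j => PySem.List.pyGetD ds j 0 * (PySem.List.pyGetD ks j 0 - 1) *
        (PySem.List.slice (1 :: ss) none (some (j + 1))).foldl (fun p v => p * v) 1)
    = (ks.zip (ds.zip (pvCum (1 :: ss) 1))).map (fun x => x.2.1 * (x.1 - 1) * x.2.2) := by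
  apply List.ext_getElem
  · simp [PySem.List.length_pyRange_one]
    omega
  · intro j hj1 hj2
    have hjk : j < ks.length := by
      simpa [PySem.List.length_pyRange_one] using hj1
    simp only [List.getElem_map, PySem.List.getElem_pyRange_one, zero_add,
      List.getElem_zip]
    have hcast : ((j : Int) + 1) = ((j + 1 : Nat) : Int) := by push_cast; ring
    rw [hcast, PySem.List.slice_to_natCast,
      pvProdTake (1 :: ss) 1 j (by simp; omega)]
    simp only [PySem.List.pyGetD_natCast]
    rw [List.getD_eq_getElem ds 0 (by omega), List.getD_eq_getElem ks 0 hjk,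
      List.getD_eq_getElem (pvCum (1 :: ss) 1) 0 (by simp; omega)]

-- B's port reduced to the reference shape
lemma pvB_eq (ks ds ss : List Int) (h1 : ks.length ≤ ds.length) (h2 : ks.length ≤ ss.length + 1) :
    compute_receptive_size_alt ks ds ss
      = [(1 : Int)] ++ pvGo (ks.zip (ds.zip (pvCum (1 :: ss) 1))) 1 := by
  unfold compute_receptive_size_alt
  simp only [PySem.List.insert_zero]
  rw [pvTerms_eq ks ds ss h1 h2]
  set terms := (ks.zip (ds.zip (pvCum (1 :: ss) 1))).map (fun x => x.2.1 * (x.1 - 1) * x.2.2)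
    with hterms
  have hlen : terms.length = ks.length := by
    simp [hterms]
    omega
  rw [pvGo_eq_go2, ← hterms]
  apply List.ext_getElem
  · simp [PySem.List.length_pyRange_one, hlen]
  · intro i hi1 hi2
    have hik : i < ks.length + 1 := by
      simpa [PySem.List.length_pyRange_one] using hi1
    simp only [List.getElem_map, PySem.List.getElem_pyRange_one, zero_add]
    rw [PySem.List.slice_to_natCast]
    rw [PySem.List.foldl_add (terms.take i) (fun x => x)]
    cases i with
    | zero => simp
    | succ i =>
      simp only [List.map_id']
      have : ([(1 : Int)] ++ pvGo2 terms 1)[i + 1] = (pvGo2 terms 1).getD i 0 := by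
        rw [List.getD_eq_getElem (pvGo2 terms 1) 0 (by rw [pvGo2_length, hlen]; omega)]
        simp
      rw [this, pvGo2_getD terms 1 i (by rw [hlen]; omega)]
      ring

-- ===== VERDICT (by name: the statement is the Claim_ definition above) =====
theorem compute_receptive_size_spec : Claim_equal_compute_receptive_size := by
  intro ks ds ss _ hpre
  unfold Spec_compute_receptive_size
  rw [pvA_eq ks ds ss hpre.1 hpre.2, pvB_eq ks ds ss hpre.1 hpre.2]
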